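-- pv_equiv track=rewrite | github.com/DireMonarch/graph-canonical-relabel-prototyping | refiner.py | partition_by_scoped_degree
-- ===== SOURCE A (Python) =====
-- def scoped_degree(G, scope, v):
--     '''
--     Returns the degree of vertex v with respect to the verticies in scope
--
--     parameters:
--         G       the graph's adjacency matrix
--         scope   the scope of vertices with which to calculate the degree
--         v       the vertex on which we are calculating the degree
--
--     returns an integer value of the degree of v with respect to scope over graph G
--     '''
--
--     d = 0
--     for s in scope:
--         d += G[v][s]
--     return d
--
-- def partition_by_scoped_degree(G, scope, cell):
--     '''
--     splits (partitions) cell into a smaller cells, grouped by their scoped degree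
--     with respect to scope, and numerically sorted by the value of their degree
--
--     parameters:
--         G       the graph's adjacency matrix
--         scope   the scope of vertices with which to calculate the degree
--         cell    the cell we are splitting
--
--     returns a list containing the new cells
--     '''
--     hash_table = {}
--     for v in cell:
--         degree = scoped_degree(G, scope, v)
--         if degree not in hash_table:
--             hash_table[degree] = []
--         hash_table[degree].append(v)
--     return [sorted(hash_table[i]) for i in sorted(hash_table.keys())]
-- ===== SOURCE B (Python) =====
-- def scoped_degree(G, scope, v):
--     d = 0
--     for s in scope:
--         d += G[v][s]
--     return d
--
-- def partition_by_scoped_degree(G, scope, cell):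
--     pairs = sorted([(scoped_degree(G, scope, v), v) for v in cell])
--     cells = []
--     i = 0
--     n = len(pairs)
--     while i < n:
--         d = pairs[i][0]
--         j = i
--         while j < n and pairs[j][0] == d:
--             j += 1
--         cells.append([v for _, v in pairs[i:j]])
--         i = j
--     return cells
-- ===== Notes on version B (the rewrite author's own statement) =====
-- stated objective: alternative
-- what changed: Replaces A's degree-keyed dict of buckets with per-bucket re-sorting by one sort of (degree, vertex) pairs followed by a single contiguous grouping pass.
import Mathlib
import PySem

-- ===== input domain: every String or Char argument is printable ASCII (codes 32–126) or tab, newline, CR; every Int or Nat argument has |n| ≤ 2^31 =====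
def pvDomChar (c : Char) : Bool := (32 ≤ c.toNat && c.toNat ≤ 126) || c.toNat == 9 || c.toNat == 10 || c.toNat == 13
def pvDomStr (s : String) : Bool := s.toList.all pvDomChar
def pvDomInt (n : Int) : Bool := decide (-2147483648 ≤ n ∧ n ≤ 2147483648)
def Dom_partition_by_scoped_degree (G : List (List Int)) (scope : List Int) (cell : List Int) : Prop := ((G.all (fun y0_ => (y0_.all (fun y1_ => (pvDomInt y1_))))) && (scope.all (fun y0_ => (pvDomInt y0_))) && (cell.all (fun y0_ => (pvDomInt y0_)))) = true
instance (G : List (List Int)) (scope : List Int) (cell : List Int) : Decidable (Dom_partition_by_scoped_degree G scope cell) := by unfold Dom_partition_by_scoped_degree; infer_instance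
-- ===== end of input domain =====

-- B replaces A's degree-keyed dict of buckets (each re-sorted) by one sort of (degree, vertex)
-- pairs followed by a single contiguous grouping pass (objective: alternative decomposition).

-- ===== PORT A =====
-- helper scoped_degree: d = 0; for s in scope: d += G[v][s]  (indexing total under Pre_)
def scoped_degree (G : List (List Int)) (scope : List Int) (v : Int) : Int :=
  scope.foldl (fun d s => d + PySem.List.pyGetD (PySem.List.pyGetD G v []) s 0) 0

def partition_by_scoped_degree (G : List (List Int)) (scope : List Int) (cell : List Int) : List (List Int) :=
  let h := cell.foldl (fun h v => h.modify (scoped_degree G scope v) [] (fun b => b ++ [v])) PySem.Dict.empty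
  (PySem.List.sorted h.keys (fun k => k)).map (fun i => PySem.List.sorted (h.getD i []) (fun x => x))

-- ===== PORT B =====
-- the scanning while-loop of Source B: emit the run of pairs sharing the head's degree, recurse on the rest
def pvGrp : List (Int × Int) → List (List Int)
  | [] => []
  | (d, v) :: rest =>
      (v :: (rest.takeWhile (fun p => p.1 == d)).map (fun p => p.2))
        :: pvGrp (rest.dropWhile (fun p => p.1 == d))
  termination_by l => l.length
  decreasing_by
    simp only [List.length_cons]
    exact Nat.lt_succ_of_le (List.length_dropWhile_le _ _)

def partition_by_scoped_degree_alt (G : List (List Int)) (scope : List Int) (cell : List Int) : List (List Int) :=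
  pvGrp (PySem.List.sorted2 (cell.map (fun v => (scoped_degree G scope v, v))) (fun p => p.1) (fun p => p.2))

-- ===== PRECONDITION & SPEC =====
-- Pre_ excludes exactly the inputs on which A raises an IndexError: scope is nonempty and some
-- v in cell (or some s in scope) indexes G (or its row) out of Python's range.
def Pre_partition_by_scoped_degree (G : List (List Int)) (scope : List Int) (cell : List Int) : Prop :=
  scope = [] ∨ ∀ v ∈ cell, PySem.Raise.InRange G.length v ∧
    ∀ s ∈ scope, PySem.Raise.InRange (PySem.List.pyGetD G v []).length s
instance (G : List (List Int)) (scope : List Int) (cell : List Int) : Decidable (Pre_partition_by_scoped_degree G scope cell) := by unfold Pre_partition_by_scoped_degree; infer_instance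

def pvWitness_partition_by_scoped_degree : List (List Int) × List Int × List Int :=
  ([[0, 1], [1, 0]], [0, 1], [0, 1])

def Spec_partition_by_scoped_degree (G : List (List Int)) (scope : List Int) (cell : List Int) (out : List (List Int)) : Prop := out = partition_by_scoped_degree_alt G scope cell
instance (G : List (List Int)) (scope : List Int) (cell : List Int) (out : List (List Int)) : Decidable (Spec_partition_by_scoped_degree G scope cell out) := by unfold Spec_partition_by_scoped_degree; infer_instance

-- ===== CLAIM (what is proved, stated in full; the proofs are below) =====
def Claim_equal_partition_by_scoped_degree : Prop := ∀ (G : List (List Int)) (scope : List Int) (cell : List Int), Dom_partition_by_scoped_degree G scope cell → Pre_partition_by_scoped_degree G scope cell → Spec_partition_by_scoped_degree G scope cell (partition_by_scoped_degree G scope cell)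

-- ===== LEMMAS AND PROOFS =====

-- lexicographic ≤ on (degree, vertex) pairs: the order Source B's sorted() leaves the pair list in
def pvLexLe (a b : Int × Int) : Prop := a.1 < b.1 ∨ (a.1 = b.1 ∧ a.2 ≤ b.2)

-- the run heads of a pair list: the degrees Source B's outer while-loop stops at
def pvKeys : List (Int × Int) → List Int
  | [] => []
  | (d, _) :: rest => d :: pvKeys (rest.dropWhile (fun p => p.1 == d))
  termination_by l => l.length
  decreasing_by
    simp only [List.length_cons]
    exact Nat.lt_succ_of_le (List.length_dropWhile_le _ _)

theorem pvLexLe_of_true {a b : Int × Int}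
    (h : (decide (a.1 < b.1) || (!decide (b.1 < a.1) && decide (a.2 < b.2))) = true) : pvLexLe a b := by
  simp only [Bool.or_eq_true, Bool.and_eq_true, Bool.not_eq_true', decide_eq_true_eq, decide_eq_false_iff_not] at h
  unfold pvLexLe; omega

theorem pvLexLe_of_false {a b : Int × Int}
    (h : (decide (a.1 < b.1) || (!decide (b.1 < a.1) && decide (a.2 < b.2))) = false) : pvLexLe b a := by
  simp only [Bool.or_eq_false_iff, Bool.and_eq_false_iff, Bool.not_eq_false', decide_eq_true_eq, decide_eq_false_iff_not] at h
  unfold pvLexLe; omega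

theorem pvLexLe_trans {a b c : Int × Int} (h1 : pvLexLe a b) (h2 : pvLexLe b c) : pvLexLe a c := by
  unfold pvLexLe at *; omega

theorem pvInsert_pairwise (x : Int × Int) (ys : List (Int × Int)) (h : ys.Pairwise pvLexLe) :
    (PySem.List.insertBy (fun a b => decide (a.1 < b.1) || (!decide (b.1 < a.1) && decide (a.2 < b.2))) x ys).Pairwise pvLexLe := by
  induction ys with
  | nil => simp [PySem.List.insertBy]
  | cons y ys ih =>
    rw [List.pairwise_cons] at h
    by_cases hb : (decide (x.1 < y.1) || (!decide (y.1 < x.1) && decide (x.2 < y.2))) = true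
    · simp only [PySem.List.insertBy, hb, if_pos]
      refine List.pairwise_cons.mpr ⟨?_, List.pairwise_cons.mpr h⟩
      intro z hz
      rcases List.mem_cons.mp hz with rfl | hz'
      · exact pvLexLe_of_true hb
      · exact pvLexLe_trans (pvLexLe_of_true hb) (h.1 z hz')
    · rw [Bool.not_eq_true] at hb
      simp only [PySem.List.insertBy, hb]
      simp only [Bool.false_eq_true, if_false]
      refine List.pairwise_cons.mpr ⟨?_, ih h.2⟩
      intro z hz
      rcases List.mem_cons.mp ((PySem.List.insertBy_perm _ x ys).mem_iff.mp hz) with rfl | h'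
      · exact pvLexLe_of_false hb
      · exact h.1 z h'

theorem pvFold_pairwise (l : List (Int × Int)) : ∀ acc, acc.Pairwise pvLexLe →
    (l.foldl (fun acc x => PySem.List.insertBy (fun a b => decide (a.1 < b.1) || (!decide (b.1 < a.1) && decide (a.2 < b.2))) x acc) acc).Pairwise pvLexLe := by
  induction l with
  | nil => intro acc h; simpa using h
  | cons x l ih =>
    intro acc h
    simp only [List.foldl_cons]
    exact ih _ (pvInsert_pairwise x acc h)

theorem pvSorted2_pairwise (xs : List (Int × Int)) :
    (PySem.List.sorted2 xs (fun p => p.1) (fun p => p.2)).Pairwise pvLexLe := by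
  have he : PySem.List.sorted2 xs (fun p => p.1) (fun p => p.2)
      = xs.foldl (fun acc x => PySem.List.insertBy (fun a b => decide (a.1 < b.1) || (!decide (b.1 < a.1) && decide (a.2 < b.2))) x acc) [] := rfl
  rw [he]
  exact pvFold_pairwise xs [] (by simp)

-- master induction: grouping a key-sorted pair list = one group per run head, each run = a filter
theorem pvMaster : ∀ (n : Nat) (l : List (Int × Int)), l.length ≤ n →
    l.Pairwise (fun a b => a.1 ≤ b.1) →
    (pvGrp l = (pvKeys l).map (fun d => (l.filter (fun p => p.1 == d)).map (fun p => p.2)))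
    ∧ (∀ a, a ∈ pvKeys l ↔ a ∈ l.map (fun p => p.1))
    ∧ (pvKeys l).Pairwise (· < ·) := by
  intro n
  induction n with
  | zero =>
    intro l hl _
    have h0 : l = [] := List.eq_nil_of_length_eq_zero (Nat.le_zero.mp hl)
    subst h0; simp [pvGrp, pvKeys]
  | succ n ih =>
    intro l hl hpw
    match l with
    | [] => simp [pvGrp, pvKeys]
    | (d, v) :: rest =>
      have hq : rest.takeWhile (fun p : Int × Int => p.1 == d) ++ rest.dropWhile (fun p : Int × Int => p.1 == d) = rest :=
        List.takeWhile_append_dropWhile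
      set t := rest.takeWhile (fun p : Int × Int => p.1 == d) with ht
      set r := rest.dropWhile (fun p : Int × Int => p.1 == d) with hr
      have hpc := List.pairwise_cons.mp hpw
      have hd_le : ∀ p ∈ rest, d ≤ p.1 := hpc.1
      have hrest_pw := hpc.2
      have hr_sub : r.Sublist rest := List.dropWhile_sublist _
      have hr_pw : r.Pairwise (fun a b : Int × Int => a.1 ≤ b.1) := List.Pairwise.sublist hr_sub hrest_pw
      have hr_len : r.length ≤ n :=
        le_trans (List.length_dropWhile_le _ _) (Nat.le_of_succ_le_succ (by simpa using hl))
      have hmem_t : ∀ p ∈ t, p.1 = d := by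
        intro p hp
        have := List.mem_takeWhile_imp hp
        simpa using this
      have hr_gt : ∀ p ∈ r, d < p.1 := by
        cases hrc : r with
        | nil => simp
        | cons p0 r' =>
          have hhead := List.head?_dropWhile_not (fun p : Int × Int => p.1 == d) rest
          rw [← hr, hrc] at hhead
          simp only [List.head?_cons] at hhead
          have hp0 : p0.1 ≠ d := by simpa using hhead
          have hd0 : d < p0.1 :=
            lt_of_le_of_ne (hd_le p0 (hr_sub.mem (hrc ▸ List.mem_cons_self))) (Ne.symm hp0)
          intro p hp
          rcases List.mem_cons.mp hp with rfl | hp'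
          · exact hd0
          · have hpw' : (p0 :: r').Pairwise (fun a b : Int × Int => a.1 ≤ b.1) := hrc ▸ hr_pw
            exact lt_of_lt_of_le hd0 ((List.pairwise_cons.mp hpw').1 p hp')
      obtain ⟨ihg, ihm, ihp⟩ := ih r hr_len hr_pw
      have hfd : ((d, v) :: rest).filter (fun p => p.1 == d) = (d, v) :: t := by
        rw [← hq]
        rw [List.filter_cons, List.filter_append]
        have h1 : t.filter (fun p : Int × Int => p.1 == d) = t :=
          List.filter_eq_self.mpr (fun p hp => by simp [hmem_t p hp])
        have h2 : r.filter (fun p : Int × Int => p.1 == d) = [] :=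
          List.filter_eq_nil_iff.mpr (fun p hp => by have := hr_gt p hp; simp; omega)
        simp [h1, h2]
      refine ⟨?_, ?_, ?_⟩
      · show pvGrp ((d, v) :: rest) = _
        simp only [pvGrp, pvKeys, ← ht, ← hr, List.map_cons]
        congr 1
        · rw [hfd]; simp
        · rw [ihg]
          apply List.map_congr_left
          intro a ha
          obtain ⟨p0, hp0r, hp0a⟩ := List.mem_map.mp ((ihm a).mp ha)
          have hda : d < a := hp0a ▸ hr_gt p0 hp0r
          have hflt : ((d, v) :: rest).filter (fun p => p.1 == a) = r.filter (fun p => p.1 == a) := by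
            rw [← hq, List.filter_cons, List.filter_append]
            have h1 : t.filter (fun p : Int × Int => p.1 == a) = [] :=
              List.filter_eq_nil_iff.mpr (fun p hp => by have := hmem_t p hp; simp; omega)
            have h2 : (d == a) = false := by simp; omega
            simp [h1, h2]
          rw [hflt]
      · intro a
        simp only [pvKeys, ← hr, List.mem_cons, List.map_cons]
        constructor
        · rintro (rfl | hk)
          · exact Or.inl rfl
          · obtain ⟨p0, hp0r, hp0a⟩ := List.mem_map.mp ((ihm a).mp hk)
            right
            rw [← hq, List.map_append]
            exact List.mem_append_right _ (List.mem_map.mpr ⟨p0, hp0r, hp0a⟩)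
        · intro hmem
          rcases hmem with rfl | hmem
          · exact Or.inl rfl
          · rw [← hq, List.map_append] at hmem
            rcases List.mem_append.mp hmem with hmem | hmem
            · obtain ⟨p0, hp0t, hp0a⟩ := List.mem_map.mp hmem
              exact Or.inl ((hp0a ▸ hmem_t p0 hp0t).symm ▸ rfl)
            · exact Or.inr ((ihm a).mpr hmem)
      · simp only [pvKeys, ← hr]
        refine List.pairwise_cons.mpr ⟨?_, ihp⟩
        intro a ha
        obtain ⟨p0, hp0r, hp0a⟩ := List.mem_map.mp ((ihm a).mp ha)
        exact hp0a ▸ hr_gt p0 hp0r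

-- ===== VERDICT (by name: the statement is the Claim_ definition above) =====
theorem partition_by_scoped_degree_spec : Claim_equal_partition_by_scoped_degree := by
  intro G scope cell _ _
  unfold Spec_partition_by_scoped_degree partition_by_scoped_degree partition_by_scoped_degree_alt
  set key : Int → Int := scoped_degree G scope with hkey
  set P : List (Int × Int) := cell.map (fun v => (key v, v)) with hP
  set S := PySem.List.sorted2 P (fun p => p.1) (fun p => p.2) with hS
  have hSperm : S.Perm P := PySem.List.sorted2_perm P _ _ _
  have hSpw : S.Pairwise pvLexLe := pvSorted2_pairwise P
  have hSpw1 : S.Pairwise (fun a b => a.1 ≤ b.1) := hSpw.imp (fun h => by unfold pvLexLe at h; omega)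
  obtain ⟨hG, hM, hK⟩ := pvMaster S.length S le_rfl hSpw1
  -- A-side: the dict loop over cell is the pair loop over P
  have hAfold : cell.foldl (fun h v => h.modify (key v) [] (fun b => b ++ [v])) (PySem.Dict.empty : PySem.Dict Int (List Int))
      = P.foldl (fun h p => h.modify p.1 [] (fun b => b ++ [p.2])) PySem.Dict.empty := by
    rw [hP, List.foldl_map]
  have hkeys : (P.foldl (fun h p => h.modify p.1 [] (fun b => b ++ [p.2])) (PySem.Dict.empty : PySem.Dict Int (List Int))).keys
      = PySem.Set.ofList (P.map (fun p => p.1)) := by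
    rw [PySem.Dict.keys_foldl_modify_key P (fun p => p.1) [] (fun _ p => fun b => b ++ [p.2]) PySem.Dict.empty]
    rw [show (PySem.Dict.empty : PySem.Dict Int (List Int)).keys = [] from rfl]
    exact PySem.Set.update_nil_left _
  have hget : ∀ i, (P.foldl (fun h p => h.modify p.1 [] (fun b => b ++ [p.2])) (PySem.Dict.empty : PySem.Dict Int (List Int))).getD i []
      = (P.filter (fun p => p.1 == i)).map (fun p => p.2) := by
    intro i
    rw [PySem.Dict.getD_foldl_modify_append P PySem.Dict.empty i]
    rw [show (PySem.Dict.empty : PySem.Dict Int (List Int)).getD i [] = [] from rfl]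
    simp
  -- sorted keys = run heads of the sorted pair list
  have hnodup : (pvKeys S).Nodup := hK.imp ne_of_lt
  have hKeq : PySem.List.sorted (PySem.Set.ofList (P.map (fun p => p.1))) (fun k => k) = pvKeys S := by
    apply PySem.List.sorted_eq_of_perm_of_pairwise_lt
    · refine (List.perm_ext_iff_of_nodup hnodup (PySem.Set.nodup_ofList _)).mpr ?_
      intro a
      rw [hM a, PySem.Set.mem_ofList, (hSperm.map (fun p => p.1)).mem_iff]
    · exact hK
  -- each sorted bucket = the snd-projection of the corresponding run of the sorted pair list
  have hbucket : ∀ i, PySem.List.sorted ((P.filter (fun p => p.1 == i)).map (fun p => p.2)) (fun x => x)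
      = (S.filter (fun p => p.1 == i)).map (fun p => p.2) := by
    intro i
    apply List.Perm.eq_of_pairwise (le := fun a b : Int => a ≤ b)
    · intro a b _ _ h1 h2; omega
    · exact PySem.List.sorted_pairwise _ _
    · rw [List.pairwise_map]
      have hf : (S.filter (fun p => p.1 == i)).Pairwise pvLexLe :=
        List.Pairwise.sublist List.filter_sublist hSpw
      refine hf.imp_of_mem ?_
      intro a b ha hb hab
      have h1 := List.of_mem_filter ha
      have h2 := List.of_mem_filter hb
      simp only [beq_iff_eq] at h1 h2
      unfold pvLexLe at hab; omega
    · exact (PySem.List.sorted_perm _ _ _).trans ((hSperm.filter _).map _).symm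
  -- assemble
  simp only [hAfold, hkeys, hget, hKeq, hG]
  exact List.map_congr_left (fun i _ => hbucket i)
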